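-- pv_equiv track=rewrite | github.com/akshayuttarkarc/QuPepFold | QuPepFold/qupepfold/qupepfold.py | fill_config_bits
-- ===== SOURCE A (Python) =====
-- def fill_config_bits(cfg_bits: str, turn2qubit: str) -> str:
--     cfg = list(turn2qubit)
--     qpos = [i for i, ch in enumerate(cfg) if ch == 'q']
--     if len(cfg_bits) != len(qpos):
--         raise ValueError(f"cfg_bits length {len(cfg_bits)} != # of 'q' in template {len(qpos)}")
--     for i, pos in enumerate(qpos):
--         cfg[pos] = cfg_bits[i]
--     expanded = ''.join(cfg)
--     assert 'q' not in expanded, "Unfilled 'q' in expanded config."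
--     return expanded
-- ===== SOURCE B (Python) =====
-- def fill_config_bits(cfg_bits: str, turn2qubit: str) -> str:
--     n = turn2qubit.count('q')
--     if len(cfg_bits) != n:
--         raise ValueError(f"cfg_bits length {len(cfg_bits)} != # of 'q' in template {n}")
--     it = iter(cfg_bits)
--     expanded = ''.join(next(it) if ch == 'q' else ch for ch in turn2qubit)
--     assert 'q' not in expanded, "Unfilled 'q' in expanded config."
--     return expanded
-- ===== Notes on version B (the rewrite author's own statement) =====
-- stated objective: simpler
-- what changed: Replaces the two-phase 'collect q-positions then assign into a mutable char list by index' with a single pass over the template that consumes the bits from an iterator inline; the q-count for the error message comes from str.count.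
import Mathlib
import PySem

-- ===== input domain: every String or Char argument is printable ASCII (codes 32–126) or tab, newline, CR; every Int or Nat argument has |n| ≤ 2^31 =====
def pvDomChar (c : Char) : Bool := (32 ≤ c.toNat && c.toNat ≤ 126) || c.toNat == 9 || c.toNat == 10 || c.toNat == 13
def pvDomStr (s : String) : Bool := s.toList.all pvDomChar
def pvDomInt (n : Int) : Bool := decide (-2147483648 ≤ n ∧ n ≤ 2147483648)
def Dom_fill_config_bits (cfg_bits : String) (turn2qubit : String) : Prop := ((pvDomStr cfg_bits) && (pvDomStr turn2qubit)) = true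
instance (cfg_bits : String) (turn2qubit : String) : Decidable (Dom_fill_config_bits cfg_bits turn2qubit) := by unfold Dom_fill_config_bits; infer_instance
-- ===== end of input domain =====

-- B replaces A's two-phase "collect q-positions, then assign by index into a mutable
-- char list" with a single pass over the template consuming the bits in order (simpler).


-- ===== PORT A =====
-- 'for i, pos in enumerate(qpos): cfg[pos] = cfg_bits[i]' as recursion with the enumerate counter i
def fillLoop (i : Nat) (qpos : List Int) (bits : List Char) (cfg : List Char) : List Char :=
  match qpos with
  | [] => cfg
  | pos :: rest =>
      fillLoop (i + 1) rest bits (PySem.List.pySetD cfg pos (PySem.List.pyGetD bits (i : Int) ' '))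

def fill_config_bits (cfg_bits : String) (turn2qubit : String) : String :=
  let cfg := turn2qubit.toList
  let qpos := ((PySem.List.enumerate cfg 0).filter (fun p => p.2 == 'q')).map Prod.fst
  -- the ValueError on length mismatch and the trailing assert are excluded by Pre_
  let cfg' := fillLoop 0 qpos cfg_bits.toList cfg
  String.mk cfg'

-- ===== PORT B =====
-- the join-generator: one pass over the template, consuming the bits iterator on 'q'
def substB (bits : List Char) (cs : List Char) : List Char :=
  match cs with
  | [] => []
  | c :: rest =>
      if c = 'q' then
        match bits with
        | b :: bs => b :: substB bs rest
        | [] => []   -- Python would raise here; unreachable under Pre_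
      else c :: substB bits rest

def fill_config_bits_alt (cfg_bits : String) (turn2qubit : String) : String :=
  -- the ValueError on length mismatch and the trailing assert are excluded by Pre_
  String.mk (substB cfg_bits.toList turn2qubit.toList)

-- ===== PRECONDITION & SPEC =====
-- Pre_ excludes exactly the inputs where A raises: a cfg_bits length differing from the
-- number of 'q' in the template (ValueError), and a cfg_bits containing 'q' (AssertionError).
def Pre_fill_config_bits (cfg_bits : String) (turn2qubit : String) : Prop :=
  cfg_bits.toList.length = turn2qubit.toList.count 'q' ∧ 'q' ∉ cfg_bits.toList
instance (cfg_bits : String) (turn2qubit : String) : Decidable (Pre_fill_config_bits cfg_bits turn2qubit) := by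
  unfold Pre_fill_config_bits; infer_instance

def pvWitness_fill_config_bits : String × String := ("01", "XqYq")

def Spec_fill_config_bits (cfg_bits : String) (turn2qubit : String) (out : String) : Prop := out = fill_config_bits_alt cfg_bits turn2qubit
instance (cfg_bits : String) (turn2qubit : String) (out : String) : Decidable (Spec_fill_config_bits cfg_bits turn2qubit out) := by unfold Spec_fill_config_bits; infer_instance

-- ===== CLAIM (what is proved, stated in full; the proofs are below) =====
def Claim_equal_fill_config_bits : Prop := ∀ (cfg_bits : String) (turn2qubit : String), Dom_fill_config_bits cfg_bits turn2qubit → Pre_fill_config_bits cfg_bits turn2qubit → Spec_fill_config_bits cfg_bits turn2qubit (fill_config_bits cfg_bits turn2qubit)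

-- ===== LEMMAS AND PROOFS =====

-- positions of 'q', recursively
def qposL : List Char → List Nat
  | [] => []
  | c :: cs => if c = 'q' then 0 :: (qposL cs).map (· + 1) else (qposL cs).map (· + 1)

def castL (ps : List Nat) : List Int := ps.map (fun n : Nat => (n : Int))

theorem castL_nil : castL [] = [] := rfl

theorem castL_cons (p : Nat) (ps : List Nat) : castL (p :: ps) = ((p : Int)) :: castL ps := rfl

theorem castL_map_succ (ps : List Nat) :
    castL (ps.map (· + 1)) = (castL ps).map (· + 1) := by
  induction ps with
  | nil => rfl
  | cons p ps ih => simp only [List.map_cons, castL_cons, ih]; push_cast; rfl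

theorem fillLoop_cons (i : Nat) (pos : Int) (rest : List Int) (bits cfg : List Char) :
    fillLoop i (pos :: rest) bits cfg
      = fillLoop (i + 1) rest bits (PySem.List.pySetD cfg pos (PySem.List.pyGetD bits (i : Int) ' ')) := rfl

theorem length_qposL (cs : List Char) : (qposL cs).length = cs.count 'q' := by
  induction cs with
  | nil => rfl
  | cons c cs ih => by_cases h : c = 'q' <;> simp [qposL, h, ih]

theorem qpos_enum (cs : List Char) (s : Int) :
    ((PySem.List.enumerate cs s).filter (fun p => p.2 == 'q')).map Prod.fst
      = (castL (qposL cs)).map (fun n => s + n) := by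
  induction cs generalizing s with
  | nil => simp [PySem.List.enumerate_nil, qposL, castL_nil]
  | cons c cs ih =>
      simp only [PySem.List.enumerate_cons, List.filter_cons]
      by_cases h : c = 'q'
      · simp only [h, beq_self_eq_true, if_pos, List.map_cons, ih, qposL, castL_cons,
          castL_map_succ, List.map_map]
        congr 1
        · push_cast; ring
        · apply List.map_congr_left; intro n _; show s + 1 + n = s + (n + 1); ring
      · simp only [beq_iff_eq, h, if_neg, not_false_eq_true, ih, qposL, castL_map_succ,
          List.map_map]
        apply List.map_congr_left; intro n _; show s + 1 + n = s + (n + 1); ring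

theorem fillLoop_shift (ps : List Nat) (i : Nat) (bits : List Char) (c : Char) (l : List Char) :
    fillLoop i (castL (ps.map (· + 1))) bits (c :: l)
      = c :: fillLoop i (castL ps) bits l := by
  induction ps generalizing i c l with
  | nil => rfl
  | cons p ps ih =>
      rw [List.map_cons, castL_cons, castL_cons, fillLoop_cons, fillLoop_cons,
        PySem.List.pySetD_natCast, PySem.List.pySetD_natCast, List.set_cons_succ]
      exact ih (i + 1) c _

theorem fillLoop_eq_substB (cs : List Char) (bits : List Char) (i : Nat)
    (h : bits.length = i + (qposL cs).length) :
    fillLoop i (castL (qposL cs)) bits cs = substB (bits.drop i) cs := by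
  induction cs generalizing i with
  | nil => simp [qposL, castL_nil, fillLoop, substB]
  | cons c cs ih =>
      by_cases hc : c = 'q'
      · subst hc
        simp only [qposL, if_pos, List.length_cons, List.length_map] at h
        have hi : i < bits.length := by omega
        rw [show qposL ('q' :: cs) = 0 :: (qposL cs).map (· + 1) from rfl,
          castL_cons, fillLoop_cons, PySem.List.pySetD_natCast, List.set_cons_zero,
          PySem.List.pyGetD_natCast, List.getD_eq_getElem bits ' ' hi,
          fillLoop_shift, ih (i + 1) (by omega),
          List.drop_eq_getElem_cons hi]
        simp [substB]
      · rw [show qposL (c :: cs) = (qposL cs).map (· + 1) from (if_neg hc),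
          fillLoop_shift, ih i (by simpa [qposL, if_neg hc] using h)]
        simp [substB, hc]

-- ===== VERDICT (by name: the statement is the Claim_ definition above) =====
theorem fill_config_bits_spec : Claim_equal_fill_config_bits := by
  intro cfg_bits turn2qubit _ hpre
  unfold Spec_fill_config_bits fill_config_bits fill_config_bits_alt
  simp only
  congr 1
  rw [qpos_enum]
  have hz : (castL (qposL turn2qubit.toList)).map (fun n => (0 : Int) + n)
      = castL (qposL turn2qubit.toList) := by
    simp
  rw [hz, fillLoop_eq_substB]
  · simp
  · rw [length_qposL]; simpa using hpre.1
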